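-- pv_equiv track=rewrite | github.com/ipa-lab/hackingBuddyGPT | src/hackingBuddyGPT/usecases/web_api_testing/documentation/openapi_specification_handler.py | is_partial_match
-- ===== SOURCE A (Python) =====
-- def is_partial_match(element, string_list):
--     """
--         Checks if the given path `element` partially matches any path in `string_list`,
--         treating path parameters (e.g., `{id}`) as wildcards.
--
--         A partial match is defined as:
--         - Having the same number of path segments.
--         - Matching all static segments (segments not wrapped in `{}`).
--
--         This is useful when comparing generalized OpenAPI paths with actual request paths.
--
--         Args:
--             element (str): The path to check for partial matches (e.g., "/users/123").
--             string_list (List[str]): A list of known paths (e.g., ["/users/{id}", "/posts/{postId}"]).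
--
--         Returns:
--             bool: True if a partial match is found, False otherwise.
--         """
--     element_parts = element.split("/")
--
--     for string in string_list:
--         string_parts = string.split("/")
--         if len(element_parts) != len(string_parts):
--             continue  # Skip if structure differs
--
--         for e_part, s_part in zip(element_parts, string_parts):
--             if s_part.startswith("{") and s_part.endswith("}"):
--                 continue  # Skip placeholders
--             if e_part != s_part:
--                 break  # No match
--         else:
--             return True  # All static parts matched
--
--     return False
-- ===== SOURCE B (Python) =====
-- def _split_seg(path):
--     """Split off the first '/'-segment: (segment, rest-after-'/') or (segment, None)."""
--     seg, sep, rest = path.partition("/")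
--     return seg, (rest if sep else None)
--
--
-- def is_partial_match(element, string_list):
--     for pattern in string_list:
--         e, p = element, pattern
--         while True:
--             e_seg, e_rest = _split_seg(e)
--             p_seg, p_rest = _split_seg(p)
--             if not ((p_seg.startswith("{") and p_seg.endswith("}")) or e_seg == p_seg):
--                 break  # static segment mismatch
--             if e_rest is None and p_rest is None:
--                 return True  # both paths exhausted together
--             if e_rest is None or p_rest is None:
--                 break  # different number of segments
--             e, p = e_rest, p_rest
--     return False
-- ===== Notes on version B (the rewrite author's own statement) =====
-- stated objective: alternative
-- what changed: B never splits the paths into segment lists: it streams through both strings segment-by-segment with partition('/'), checking each pair as it goes and detecting a segment-count mismatch by one side running out early, instead of A's split-both-then-compare-lengths-then-zip approach.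
import Mathlib
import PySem

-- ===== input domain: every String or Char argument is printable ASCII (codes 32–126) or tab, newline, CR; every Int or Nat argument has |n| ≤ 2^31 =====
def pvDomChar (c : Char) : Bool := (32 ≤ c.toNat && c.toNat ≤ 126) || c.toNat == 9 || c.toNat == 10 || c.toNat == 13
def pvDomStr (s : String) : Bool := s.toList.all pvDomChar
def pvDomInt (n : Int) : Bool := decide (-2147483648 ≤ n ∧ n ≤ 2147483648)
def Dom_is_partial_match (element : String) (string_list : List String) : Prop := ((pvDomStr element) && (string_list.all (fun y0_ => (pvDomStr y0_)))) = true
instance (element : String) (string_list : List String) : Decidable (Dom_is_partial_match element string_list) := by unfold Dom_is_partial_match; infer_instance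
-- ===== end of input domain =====

-- B streams through both paths segment-by-segment with partition('/') instead of A's
-- split-into-lists, compare-lengths, zip-and-compare approach (objective: alternative).


-- ===== PORT A =====
-- inner 'for e_part, s_part in zip(...)... else: return True' loop: true iff no break
def aInner : List (List Char × List Char) → Bool
  | [] => true
  | (e_part, s_part) :: rest =>
    if PySem.Chars.startswith s_part ['{'] && PySem.Chars.endswith s_part ['}'] then
      aInner rest
    else if e_part ≠ s_part then false
    else aInner rest

-- outer 'for string in string_list' loop
def aLoop (element_parts : List (List Char)) : List String → Bool
  | [] => false
  | s :: rest =>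
    let string_parts := PySem.Chars.splitOn s.toList ['/']
    if element_parts.length ≠ string_parts.length then aLoop element_parts rest
    else if aInner (element_parts.zip string_parts) then true
    else aLoop element_parts rest

def is_partial_match (element : String) (string_list : List String) : Bool :=
  aLoop (PySem.Chars.splitOn element.toList ['/']) string_list

-- ===== PORT B =====
-- hand port of Source B's `s.partition("/")` (first segment, rest after the first '/' if any);
-- exact: scans to the first '/' like str.partition with a single-char separator
def bSplitSeg : List Char → List Char × Option (List Char)
  | [] => ([], none)
  | c :: cs =>
    if c = '/' then ([], some cs)
    else
      let r := bSplitSeg cs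
      (c :: r.1, r.2)

theorem bSplitSeg_some_length : ∀ (l r : List Char), (bSplitSeg l).2 = some r → r.length < l.length := by
  intro l
  induction l with
  | nil => intro r h; simp [bSplitSeg] at h
  | cons c cs ih =>
    intro r h
    by_cases hc : c = '/'
    · simp [bSplitSeg, hc] at h; subst h; simp
    · simp [bSplitSeg, hc] at h
      exact Nat.lt_succ_of_lt (ih r h)

-- the 'while True' loop of Source B
def bMatch (e p : List Char) : Bool :=
  let r := bSplitSeg e
  let s := bSplitSeg p
  if (PySem.Chars.startswith s.1 ['{'] && PySem.Chars.endswith s.1 ['}']) || r.1 == s.1 then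
    match hr : r.2, s.2 with
    | none, none => true
    | some e', some p' => bMatch e' p'
    | none, some _ => false
    | some _, none => false
  else false
termination_by e.length
decreasing_by exact bSplitSeg_some_length e e' hr

def is_partial_match_alt (element : String) (string_list : List String) : Bool :=
  string_list.any (fun pattern => bMatch element.toList pattern.toList)

-- ===== PRECONDITION & SPEC =====
def Spec_is_partial_match (element : String) (string_list : List String) (out : Bool) : Prop := out = is_partial_match_alt element string_list
instance (element : String) (string_list : List String) (out : Bool) : Decidable (Spec_is_partial_match element string_list out) := by unfold Spec_is_partial_match; infer_instance

-- ===== CLAIM (what is proved, stated in full; the proofs are below) =====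
def Claim_equal_is_partial_match : Prop := ∀ (element : String) (string_list : List String), Dom_is_partial_match element string_list → Spec_is_partial_match element string_list (is_partial_match element string_list)

-- ===== LEMMAS AND PROOFS =====

-- reference segment list: what splitting on '/' yields, phrased recursively
def segs : List Char → List (List Char)
  | [] => [[]]
  | c :: cs =>
    if c = '/' then [] :: segs cs
    else
      match segs cs with
      | [] => [[c]]
      | s :: ss => (c :: s) :: ss

theorem segs_ne_nil (l : List Char) : segs l ≠ [] := by
  induction l with
  | nil => simp [segs]
  | cons c cs ih =>
    by_cases hc : c = '/'
    · simp [segs, hc]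
    · simp only [segs, hc, if_false]
      cases segs cs <;> simp

theorem splitOn_go_spec : ∀ (fuel : Nat) (l cur : List Char) (acc : List (List Char)),
    l.length < fuel →
    PySem.Chars.splitOn.go ['/'] fuel l cur acc
      = acc.reverse ++ (segs l).modifyHead (cur.reverse ++ ·) := by
  intro fuel
  induction fuel with
  | zero => intro l cur acc h; omega
  | succ n ih =>
    intro l cur acc h
    cases l with
    | nil => simp [PySem.Chars.splitOn.go, segs]
    | cons c rest =>
      by_cases hc : c = '/'
      · have hpre : List.isPrefixOf ['/'] (c :: rest) = true := by simp [hc, List.isPrefixOf]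
        rw [PySem.Chars.splitOn.go, if_pos hpre]
        have := ih rest [] (cur.reverse :: acc) (by simp at h ⊢; omega)
        show PySem.Chars.splitOn.go ['/'] n (List.drop 1 (c :: rest)) [] (cur.reverse :: acc) = _
        simp only [List.drop_succ_cons, List.drop_zero]
        rw [this]
        simp [segs, hc, List.modifyHead]
        cases hs : segs rest with
        | nil => exact absurd hs (segs_ne_nil rest)
        | cons s ss => simp
      · have hpre : List.isPrefixOf ['/'] (c :: rest) = false := by
          simp [List.isPrefixOf]; exact fun h' => absurd h'.symm hc
        rw [PySem.Chars.splitOn.go, if_neg (by simp [hpre])]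
        have := ih rest (c :: cur) acc (by simp at h ⊢; omega)
        rw [this]
        simp only [segs, hc, if_false]
        cases hs : segs rest with
        | nil => exact absurd hs (segs_ne_nil rest)
        | cons s ss => simp [List.modifyHead]

theorem splitOn_eq_segs (l : List Char) : PySem.Chars.splitOn l ['/'] = segs l := by
  have h := splitOn_go_spec (l.length + 1) l [] [] (by omega)
  rw [PySem.Chars.splitOn, h]
  simp [List.modifyHead_eq_set]
  cases hs : segs l with
  | nil => exact absurd hs (segs_ne_nil l)
  | cons s ss => simp

-- segs through the eyes of bSplitSeg
theorem segs_bSplitSeg (l : List Char) :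
    segs l = (bSplitSeg l).1 ::
      (match (bSplitSeg l).2 with
       | none => []
       | some r => segs r) := by
  induction l with
  | nil => simp [segs, bSplitSeg]
  | cons c cs ih =>
    by_cases hc : c = '/'
    · simp [segs, bSplitSeg, hc]
    · simp only [segs, bSplitSeg, hc, if_false]
      rw [ih]

theorem aInner_cons (a b : List Char) (r : List (List Char × List Char)) :
    aInner ((a, b) :: r)
      = if (PySem.Chars.startswith b ['{'] && PySem.Chars.endswith b ['}']) || a == b then aInner r
        else false := by
  rw [aInner]
  by_cases hph : (PySem.Chars.startswith b ['{'] && PySem.Chars.endswith b ['}']) = true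
  · simp [hph]
  · by_cases hab : a = b <;> simp [hph, hab]

-- the heart: B's streaming match equals A's length-check + zip-scan on the segment lists
theorem bMatch_eq_check_aux : ∀ (n : Nat) (e p : List Char), e.length < n →
    bMatch e p = ((segs e).length == (segs p).length && aInner ((segs e).zip (segs p))) := by
  intro n
  induction n with
  | zero => intro e p h; omega
  | succ n ih =>
    intro e p h
    rw [bMatch, segs_bSplitSeg e, segs_bSplitSeg p]
    by_cases hcond : (PySem.Chars.startswith (bSplitSeg p).1 ['{'] &&
        PySem.Chars.endswith (bSplitSeg p).1 ['}'] || (bSplitSeg e).1 == (bSplitSeg p).1) = true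
    · rcases he : (bSplitSeg e).2 with _ | e' <;> rcases hp : (bSplitSeg p).2 with _ | p'
      · simp [hcond, aInner_cons, aInner]
      · have hq := segs_ne_nil p'
        simp [hcond, aInner_cons]
        cases hs : segs p' with
        | nil => exact absurd hs hq
        | cons a as => simp
      · have hq := segs_ne_nil e'
        simp [hcond, aInner_cons]
        cases hs : segs e' with
        | nil => exact absurd hs hq
        | cons a as => simp
      · have hlt : e'.length < n := by
          have := bSplitSeg_some_length e e' he
          omega
        simp [hcond, aInner_cons, ih e' p' hlt]
    · simp only [Bool.not_eq_true] at hcond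
      simp [hcond, aInner_cons]

theorem bMatch_eq_check (e p : List Char) :
    bMatch e p = ((segs e).length == (segs p).length && aInner ((segs e).zip (segs p))) :=
  bMatch_eq_check_aux (e.length + 1) e p (by omega)

-- A's outer loop with early return is an 'any' over the per-pattern check
theorem aLoop_eq_any (ep : List (List Char)) (l : List String) :
    aLoop ep l = l.any (fun s =>
      (ep.length == (PySem.Chars.splitOn s.toList ['/']).length) &&
        aInner (ep.zip (PySem.Chars.splitOn s.toList ['/']))) := by
  induction l with
  | nil => rfl
  | cons s rest ih =>
    rw [aLoop, List.any_cons, ih]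
    by_cases hl : ep.length = (PySem.Chars.splitOn s.toList ['/']).length
    · by_cases hi : aInner (ep.zip (PySem.Chars.splitOn s.toList ['/'])) = true <;>
        simp [hl, hi]
    · simp [hl]

-- ===== VERDICT (by name: the statement is the Claim_ definition above) =====
theorem is_partial_match_spec : Claim_equal_is_partial_match := by
  intro element string_list _
  unfold Spec_is_partial_match is_partial_match is_partial_match_alt
  rw [aLoop_eq_any]
  simp only [splitOn_eq_segs, bMatch_eq_check]
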